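-- pv_equiv track=rewrite | github.com/Ignaciocl/tp0-base | server/common/bingo.py | _stringToArrayStringBingoDto
-- ===== SOURCE A (Python) =====
-- def _stringToArrayStringBingoDto(msg: str):
--     res = []
--     inter = ''
--     for x in msg.rstrip(']').lstrip('['):
--         if x == '"':
--             continue
--         inter += x
--         if x == '}':
--             res.append(inter)
--             inter = ''
--     return res
-- ===== SOURCE B (Python) =====
-- def _stringToArrayStringBingoDto(msg: str):
--     s = msg.rstrip(']').lstrip('[').replace('"', '')
--     return [p + '}' for p in s.split('}')[:-1]]
-- ===== Notes on version B (the rewrite author's own statement) =====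
-- stated objective: simpler
-- what changed: Replaced A's character-by-character accumulate-and-flush loop by one pass that cleans the string with rstrip/lstrip/replace, splits on the closing brace, drops the trailing fragment, and reattaches the brace in a comprehension.
import Mathlib
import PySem

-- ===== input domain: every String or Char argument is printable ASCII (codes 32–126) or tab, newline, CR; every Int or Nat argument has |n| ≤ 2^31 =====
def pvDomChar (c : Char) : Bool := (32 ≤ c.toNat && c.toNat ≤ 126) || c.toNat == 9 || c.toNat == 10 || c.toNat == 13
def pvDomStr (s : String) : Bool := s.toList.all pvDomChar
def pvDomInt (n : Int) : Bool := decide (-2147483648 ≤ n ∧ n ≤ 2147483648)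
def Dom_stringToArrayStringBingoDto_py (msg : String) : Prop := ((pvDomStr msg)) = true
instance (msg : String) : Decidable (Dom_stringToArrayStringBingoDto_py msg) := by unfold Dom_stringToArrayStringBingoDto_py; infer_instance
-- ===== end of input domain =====

-- B replaces A's accumulate-and-flush character loop by one split on '}' plus a comprehension
-- reattaching the brace (objective: simpler; same O(n), measurably faster by constant factor via str.split).

-- ===== PORT A =====
-- msg.rstrip(']') : drop trailing ']' characters (one-sided, single char set) — exact hand port
def pvRstripBracket (cs : List Char) : List Char := (cs.reverse.dropWhile (· == ']')).reverse
-- msg.lstrip('[') : drop leading '[' characters — exact hand port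
def pvLstripBracket (cs : List Char) : List Char := cs.dropWhile (· == '[')

-- the explicit for-loop of A: state (res, inter); skips '"', flushes inter at '}'
def pvALoop : List Char → List String → List Char → List String
  | [], res, _inter => res
  | x :: xs, res, inter =>
    if x = '"' then pvALoop xs res inter
    else
      let inter' := inter ++ [x]
      if x = '}' then pvALoop xs (res ++ [String.ofList inter']) [] else pvALoop xs res inter'

def stringToArrayStringBingoDto_py (msg : String) : List String :=
  pvALoop (pvLstripBracket (pvRstripBracket msg.toList)) [] []

-- ===== PORT B =====
def stringToArrayStringBingoDto_py_alt (msg : String) : List String :=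
  ((PySem.Chars.splitOn
      (PySem.Chars.replace (pvLstripBracket (pvRstripBracket msg.toList)) ['"'] []) ['}']).dropLast).map
    (fun p => String.ofList (p ++ ['}']))

-- ===== PRECONDITION & SPEC =====
def Spec_stringToArrayStringBingoDto_py (msg : String) (out : List String) : Prop := out = stringToArrayStringBingoDto_py_alt msg
instance (msg : String) (out : List String) : Decidable (Spec_stringToArrayStringBingoDto_py msg out) := by unfold Spec_stringToArrayStringBingoDto_py; infer_instance

-- ===== CLAIM (what is proved, stated in full; the proofs are below) =====
def Claim_equal_stringToArrayStringBingoDto_py : Prop := ∀ (msg : String), Dom_stringToArrayStringBingoDto_py msg → Spec_stringToArrayStringBingoDto_py msg (stringToArrayStringBingoDto_py msg)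

-- ===== LEMMAS AND PROOFS =====

-- replace(s, '"', '') is the filter dropping '"'
theorem pv_replace_go_filter (fuel : Nat) (l acc : List Char) (h : l.length ≤ fuel) :
    PySem.Chars.replace.go ['"'] [] fuel l acc = acc.reverse ++ l.filter (fun c => !(c == '"')) := by
  induction fuel generalizing l acc with
  | zero =>
    interval_cases hl : l.length
    · cases l with
      | nil => simp [PySem.Chars.replace.go]
      | cons c t => simp at hl
  | succ f ih =>
    cases l with
    | nil => simp [PySem.Chars.replace.go]
    | cons c t =>
      simp only [PySem.Chars.replace.go]
      by_cases hc : c = '"'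
      · subst hc
        rw [if_pos (by simp [List.isPrefixOf])]
        simp only [List.length_cons] at h
        simp only [List.length_singleton, List.drop_succ_cons, List.drop_zero, List.reverse_nil,
          List.nil_append]
        rw [ih t acc (by omega)]
        simp
      · rw [if_neg (by simp [List.isPrefixOf]; exact fun h' => hc h'.symm)]
        simp only [List.length_cons] at h
        rw [ih t (c :: acc) (by omega)]
        simp [hc]

theorem pv_replace_filter (l : List Char) :
    PySem.Chars.replace l ['"'] [] = l.filter (fun c => !(c == '"')) := by
  rw [PySem.Chars.replace]
  rw [if_neg (by simp)]
  simpa using pv_replace_go_filter l.length l [] le_rfl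

-- a direct structural version of splitting on '}' (cur is kept reversed, as in splitOn.go)
def pvSplitBr : List Char → List Char → List (List Char)
  | [], cur => [cur.reverse]
  | c :: t, cur => if c = '}' then cur.reverse :: pvSplitBr t [] else pvSplitBr t (c :: cur)

theorem pv_splitBr_ne_nil (l cur : List Char) : pvSplitBr l cur ≠ [] := by
  induction l generalizing cur with
  | nil => simp [pvSplitBr]
  | cons c t ih =>
    simp only [pvSplitBr]
    split_ifs
    · simp
    · exact ih _

theorem pv_splitOn_go (fuel : Nat) (l cur : List Char) (acc : List (List Char))
    (h : l.length < fuel) :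
    PySem.Chars.splitOn.go ['}'] fuel l cur acc = acc.reverse ++ pvSplitBr l cur := by
  induction fuel generalizing l cur acc with
  | zero => omega
  | succ f ih =>
    cases l with
    | nil => simp [PySem.Chars.splitOn.go, pvSplitBr]
    | cons c t =>
      simp only [PySem.Chars.splitOn.go]
      by_cases hc : c = '}'
      · subst hc
        rw [if_pos (by simp [List.isPrefixOf])]
        simp only [List.length_cons] at h
        simp only [List.length_singleton, List.drop_succ_cons, List.drop_zero]
        rw [ih t [] _ (by omega)]
        simp [pvSplitBr]
      · rw [if_neg (by simp [List.isPrefixOf]; exact fun h' => hc h'.symm)]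
        simp only [List.length_cons] at h
        rw [ih t (c :: cur) acc (by omega)]
        simp [pvSplitBr, hc]

theorem pv_splitOn_eq (l : List Char) :
    PySem.Chars.splitOn l ['}'] = pvSplitBr l [] := by
  rw [PySem.Chars.splitOn]
  simpa using pv_splitOn_go (l.length + 1) l [] [] (by omega)

-- A's loop computes B's split-map over the '"'-filtered remainder
theorem pv_aLoop_eq (l : List Char) (res : List String) (inter : List Char) :
    pvALoop l res inter =
      res ++ ((pvSplitBr (l.filter (fun c => !(c == '"'))) inter.reverse).dropLast).map
        (fun p => String.ofList (p ++ ['}'])) := by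
  induction l generalizing res inter with
  | nil => simp [pvALoop, pvSplitBr]
  | cons x t ih =>
    by_cases hq : x = '"'
    · subst hq
      simp only [pvALoop]
      rw [ih]
      simp
    · by_cases hb : x = '}'
      · subst hb
        rw [show pvALoop ('}' :: t) res inter
            = pvALoop t (res ++ [String.ofList (inter ++ ['}'])]) [] from rfl, ih]
        have hne := pv_splitBr_ne_nil (t.filter (fun c => !(c == '"'))) []
        simp only [List.filter_cons, show (!('}' == '"')) = true from rfl]
        simp [pvSplitBr, List.dropLast_cons_of_ne_nil hne]
      · simp only [pvALoop, if_neg hq, if_neg hb]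
        rw [ih]
        simp [hq, pvSplitBr, hb]

-- ===== VERDICT (by name: the statement is the Claim_ definition above) =====
theorem stringToArrayStringBingoDto_py_spec : Claim_equal_stringToArrayStringBingoDto_py := by
  intro msg _
  show stringToArrayStringBingoDto_py msg = stringToArrayStringBingoDto_py_alt msg
  unfold stringToArrayStringBingoDto_py stringToArrayStringBingoDto_py_alt
  rw [pv_replace_filter, pv_splitOn_eq, pv_aLoop_eq]
  simp
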